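-- pv_equiv track=rewrite | github.com/ScooterA/My-landing-page | ESL_Comment_Generator_Teacher_Edition_Draft_4_Teacher_Edition.py | clean_clause
-- ===== SOURCE A (Python) =====
-- def clean_clause(text: str) -> str:
--     if not text:
--         return ""
--     t = text.strip()
--     while t and t[-1] in ".!?,":  # remove ending punctuation
--         t = t[:-1].rstrip()
--     if t:
--         t = t[0].lower() + t[1:]
--     return t
-- ===== SOURCE B (Python) =====
-- def clean_clause(text: str) -> str:
--     t = text.strip()
--     i = len(t)
--     while i > 0 and (t[i - 1] in ".!?," or t[i - 1].isspace()):
--         i -= 1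
--     t = t[:i]
--     return t[0].lower() + t[1:] if t else ""
-- ===== Notes on version B (the rewrite author's own statement) =====
-- stated objective: faster
-- what changed: Replaces the repeated slice-and-rstrip while loop (O(n^2) slicing) with a single reverse index scan that finds the cut point in one O(n) pass and slices once.
import Mathlib
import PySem

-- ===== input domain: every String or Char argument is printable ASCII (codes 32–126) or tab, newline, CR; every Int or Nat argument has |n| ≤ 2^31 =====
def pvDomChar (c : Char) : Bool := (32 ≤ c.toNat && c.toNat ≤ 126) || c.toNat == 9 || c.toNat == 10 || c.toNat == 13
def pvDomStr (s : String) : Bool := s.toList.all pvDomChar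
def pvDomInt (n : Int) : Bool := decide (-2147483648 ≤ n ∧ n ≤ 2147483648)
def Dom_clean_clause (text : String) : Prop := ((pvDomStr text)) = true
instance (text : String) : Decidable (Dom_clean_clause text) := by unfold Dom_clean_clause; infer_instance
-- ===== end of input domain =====

-- B replaces A's repeated slice-and-rstrip loop with one reverse index scan (faster: one O(n) pass).

-- ===== PORT A =====
-- termination helper for A's while loop (cited by decreasing_by)
theorem pvRstripDropLast_lt (t : List Char) (h : t ≠ []) :
    (PySem.Chars.rstrip t.dropLast).length < t.length := by
  have h1 : (PySem.Chars.rstrip t.dropLast).length ≤ t.dropLast.length := by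
    have := List.length_dropWhile_le PySem.Chars.isspace t.dropLast.reverse
    simpa [PySem.Chars.rstrip] using this
  have h2 : t.dropLast.length < t.length := by
    cases t with
    | nil => exact absurd rfl h
    | cons a l => simp [List.length_dropLast]
  omega

-- the `while t and t[-1] in ".!?,": t = t[:-1].rstrip()` loop of A
-- (`t[-1] in ".!?,"`: membership of the last character in the 4 punctuation chars, exact)
def cleanLoopA (t : List Char) : List Char :=
  if h : t ≠ [] then
    if ['.', '!', '?', ','].contains (t.getLast h) then
      cleanLoopA (PySem.Chars.rstrip t.dropLast)
    else t
  else t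
termination_by t.length
decreasing_by exact pvRstripDropLast_lt t h

def clean_clause (text : String) : String :=
  if text = "" then ""
  else
    let t := cleanLoopA (PySem.Chars.strip text.toList)
    match t with
    | [] => ""
    | c :: rest => String.ofList (PySem.Chars.lowerChar c :: rest)

-- ===== PORT B =====
-- `while i > 0 and (t[i-1] in ".!?," or t[i-1].isspace()): i -= 1`
def scanB (t : List Char) : Nat → Nat
  | 0 => 0
  | i + 1 =>
      if ['.', '!', '?', ','].contains (t.getD i ' ') || PySem.Chars.isspace (t.getD i ' ') then
        scanB t i
      else i + 1

def clean_clause_alt (text : String) : String :=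
  let t0 := PySem.Chars.strip text.toList
  let t := t0.take (scanB t0 t0.length)
  match t with
  | [] => ""
  | c :: rest => String.ofList (PySem.Chars.lowerChar c :: rest)

-- ===== PRECONDITION & SPEC =====
def Spec_clean_clause (text : String) (out : String) : Prop := out = clean_clause_alt text
instance (text : String) (out : String) : Decidable (Spec_clean_clause text out) := by unfold Spec_clean_clause; infer_instance

-- ===== CLAIM (what is proved, stated in full; the proofs are below) =====
def Claim_equal_clean_clause : Prop := ∀ (text : String), Dom_clean_clause text → Spec_clean_clause text (clean_clause text)

-- ===== LEMMAS AND PROOFS =====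

-- the combined character class both loops remove from the right
def pvDrop (c : Char) : Bool :=
  ['.', '!', '?', ','].contains c || PySem.Chars.isspace c

theorem pvDropWhile_subset {p q : Char → Bool} (hpq : ∀ c, q c = true → p c = true)
    (l : List Char) : (l.dropWhile q).dropWhile p = l.dropWhile p := by
  induction l with
  | nil => rfl
  | cons a l ih =>
      by_cases hq : q a = true
      · simp [List.dropWhile, hq, hpq a hq, ih]
      · have hqf := Bool.eq_false_iff.mpr hq
        simp [List.dropWhile_cons, hqf]

theorem pvSpace_drop (c : Char) (h : PySem.Chars.isspace c = true) : pvDrop c = true := by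
  simp [pvDrop, h]

-- B's scan ignores list elements at positions ≥ i
theorem pvScanB_append (t : List Char) (c : Char) (i : Nat) (hi : i ≤ t.length) :
    scanB (t ++ [c]) i = scanB t i := by
  induction i with
  | zero => rfl
  | succ j ih =>
      have hj : j < t.length := hi
      have : (t ++ [c]).getD j ' ' = t.getD j ' ' := by
        simp [List.getD, List.getElem?_append_left hj]
      simp only [scanB, this]
      split
      · exact ih (le_of_lt hj)
      · rfl

theorem pvScanB_le (t : List Char) (i : Nat) : scanB t i ≤ i := by
  induction i with
  | zero => simp [scanB]
  | succ j ih =>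
      simp only [scanB]
      split
      · omega
      · omega

-- B's result = drop pvDrop-characters from the right
theorem pvScanB_spec (t : List Char) :
    t.take (scanB t t.length) = (t.reverse.dropWhile pvDrop).reverse := by
  induction t using List.reverseRecOn with
  | nil => rfl
  | append_singleton t c ih =>
      have hlen : (t ++ [c]).length = t.length + 1 := by simp
      by_cases hc : pvDrop c = true
      · have hget : (t ++ [c]).getD t.length ' ' = c := by
          simp [List.getD]
        have hstep : scanB (t ++ [c]) (t.length + 1) = scanB t t.length := by
          simp only [scanB, hget]
          rw [if_pos (by simpa [pvDrop] using hc)]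
          exact pvScanB_append t c t.length le_rfl
        have htake : (t ++ [c]).take (scanB t t.length) = t.take (scanB t t.length) := by
          exact List.take_append_of_le_length (pvScanB_le t t.length)
        rw [hlen, hstep, htake, ih]
        simp [hc]
      · have hget : (t ++ [c]).getD t.length ' ' = c := by
          simp [List.getD]
        have hstep : scanB (t ++ [c]) (t.length + 1) = t.length + 1 := by
          simp only [scanB, hget]
          rw [if_neg (by simpa [pvDrop] using hc)]
        have hcf := Bool.eq_false_iff.mpr hc
        rw [hlen, hstep, List.take_of_length_le (by simp)]
        simp [hcf]
  
-- A's loop on an already-rstripped list = drop pvDrop-characters from the right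
theorem pvCleanLoopA_spec (n : Nat) : ∀ (t : List Char), t.length ≤ n →
    PySem.Chars.rstrip t = t →
    cleanLoopA t = (t.reverse.dropWhile pvDrop).reverse := by
  induction n with
  | zero =>
      intro t hlen _
      have : t = [] := List.eq_nil_of_length_eq_zero (Nat.le_zero.mp hlen)
      subst this; simp [cleanLoopA]
  | succ n ih =>
      intro t hlen hrs
      by_cases hne : t ≠ []
      · set c := t.getLast hne with hc
        have hrev : t.reverse = c :: t.dropLast.reverse := by
          conv_lhs => rw [← List.dropLast_append_getLast hne]
          simp
          exact hc.symm
        by_cases hpunct : ['.', '!', '?', ','].contains c = true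
        · -- A removes c then rstrips; both sides keep dropping
          have hlt := pvRstripDropLast_lt t hne
          rw [cleanLoopA]
          rw [dif_pos hne, if_pos (by simpa using hpunct)]
          have hrs2 : PySem.Chars.rstrip (PySem.Chars.rstrip t.dropLast)
              = PySem.Chars.rstrip t.dropLast := by
            unfold PySem.Chars.rstrip
            rw [List.reverse_reverse, pvDropWhile_subset (fun c h => h)]
          rw [ih _ (Nat.lt_succ_iff.mp (lt_of_lt_of_le hlt hlen)) hrs2]
          congr 1
          have : (PySem.Chars.rstrip t.dropLast).reverse
              = t.dropLast.reverse.dropWhile PySem.Chars.isspace := by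
            simp [PySem.Chars.rstrip]
          rw [this, pvDropWhile_subset pvSpace_drop, hrev]
          have hmem := hpunct
          simp at hmem
          have hp : pvDrop c = true := by
            simp [pvDrop]
            exact Or.inl hmem
          simp [hp]
        · -- last char is neither punctuation nor (since t is rstripped) whitespace
          have hnsp : PySem.Chars.isspace c = false := by
            by_contra hsp
            have hsp' : PySem.Chars.isspace c = true := by
              cases h : PySem.Chars.isspace c
              · exact absurd h hsp
              · rfl
            have : PySem.Chars.rstrip t ≠ t := by
              simp only [PySem.Chars.rstrip]
              intro heq
              have h1 : t.reverse.dropWhile PySem.Chars.isspace = t.reverse := by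
                have := congrArg List.reverse heq
                simpa using this
              rw [hrev] at h1
              simp [List.dropWhile, hsp'] at h1
              have hlen1 := congrArg List.length h1
              have hle := List.length_dropWhile_le PySem.Chars.isspace t.dropLast.reverse
              simp at hlen1 hle
              omega
            exact this hrs
          have hdrop : pvDrop c = false := by
            unfold pvDrop
            rw [Bool.eq_false_iff.mpr hpunct, hnsp]
            rfl
          rw [cleanLoopA]
          rw [dif_pos hne, if_neg (by simpa using hpunct)]
          rw [hrev, List.dropWhile_cons]
          simp only [hdrop, Bool.false_eq_true, if_false]
          rw [← hrev, List.reverse_reverse]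
      · have h0 : t = [] := not_not.mp hne
        subst h0; simp [cleanLoopA]

theorem pvStrip_rstripped (l : List Char) :
    PySem.Chars.rstrip (PySem.Chars.strip l) = PySem.Chars.strip l := by
  unfold PySem.Chars.strip PySem.Chars.rstrip
  rw [List.reverse_reverse, pvDropWhile_subset (fun c h => h)]

-- ===== VERDICT (by name: the statement is the Claim_ definition above) =====
theorem clean_clause_spec : Claim_equal_clean_clause := by
  intro text _
  unfold Spec_clean_clause clean_clause clean_clause_alt
  have key : cleanLoopA (PySem.Chars.strip text.toList)
      = (PySem.Chars.strip text.toList).take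
          (scanB (PySem.Chars.strip text.toList) (PySem.Chars.strip text.toList).length) := by
    rw [pvScanB_spec, pvCleanLoopA_spec (PySem.Chars.strip text.toList).length _ le_rfl
        (pvStrip_rstripped _)]
  by_cases h : text = ""
  · subst h
    rfl
  · rw [if_neg h]
    simp only [key]
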